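-- pv_equiv track=rewrite | github.com/heejung-gjt/TIL | 2023/Programmers/배열의 길이에 따라 다른 연산하기.py | solution
-- ===== SOURCE A (Python) =====
-- def solution(arr, n):
--     answer = []
--
--     if len(arr) % 2 == 0: # 짝수
--         for i, j in enumerate(arr):
--             if i % 2 != 0:
--                 j = j + n
--             answer.append(j)
--
--     else: # 홀수
--         for i, j in enumerate(arr):
--             if i % 2 == 0:
--                 j = j + n
--             answer.append(j)
--
--     return answer
-- ===== SOURCE B (Python) =====
-- def solution(arr, n):
--     answer = list(arr)
--     start = 1 - len(arr) % 2
--     answer[start::2] = [x + n for x in answer[start::2]]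
--     return answer
-- ===== Notes on version B (the rewrite author's own statement) =====
-- stated objective: idiomatic
-- what changed: Replaces A's length-parity branch with two per-element enumerate/if loops by computing the first target index start = 1 - len(arr) % 2 and applying one strided slice assignment answer[start::2] = [x + n for x in answer[start::2]] over only the targeted positions.
import Mathlib
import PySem

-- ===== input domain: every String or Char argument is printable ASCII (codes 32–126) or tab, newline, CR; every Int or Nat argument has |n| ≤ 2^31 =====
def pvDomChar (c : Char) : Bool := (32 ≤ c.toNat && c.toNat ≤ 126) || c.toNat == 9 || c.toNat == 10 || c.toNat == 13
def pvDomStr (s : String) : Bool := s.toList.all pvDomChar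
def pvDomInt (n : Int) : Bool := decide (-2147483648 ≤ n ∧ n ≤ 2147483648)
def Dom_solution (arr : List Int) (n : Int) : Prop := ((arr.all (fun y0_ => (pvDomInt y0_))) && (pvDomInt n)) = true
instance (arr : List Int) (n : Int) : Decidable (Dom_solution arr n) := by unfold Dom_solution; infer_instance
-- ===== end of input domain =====

-- B replaces A's length-parity branch with two enumerate/if loops by one strided
-- slice assignment starting at index 1 - len(arr) % 2 (idiomatic; same cost).


-- ===== PORT A =====
def solution (arr : List Int) (n : Int) : List Int :=
  if PySem.Int.mod (PySem.List.len arr) 2 == 0 then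
    (PySem.List.enumerate arr).foldl
      (fun answer ij => answer ++ [if PySem.Int.mod ij.1 2 != 0 then ij.2 + n else ij.2]) []
  else
    (PySem.List.enumerate arr).foldl
      (fun answer ij => answer ++ [if PySem.Int.mod ij.1 2 == 0 then ij.2 + n else ij.2]) []

-- ===== PORT B =====
-- hand ports of the step-2 slice read xs[s::2] and slice assignment
-- xs[s::2] = vals; exact Python semantics for a nonnegative start s (the
-- common prefix xs.take s / xs.drop s is applied at the call site) and
-- len(vals) = len(xs[s::2]), which B guarantees.
def takeStride2 {α : Type} : List α → List α
  | [] => []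
  | [x] => [x]
  | x :: _ :: xs => x :: takeStride2 xs

def putStride2 {α : Type} : List α → List α → List α
  | [], _ => []
  | x :: xs, [] => x :: xs
  | _ :: [], v :: _ => [v]
  | _ :: y :: xs, v :: vs => v :: y :: putStride2 xs vs

def solution_alt (arr : List Int) (n : Int) : List Int :=
  let start := 1 - PySem.Int.mod (PySem.List.len arr) 2
  let vals := (takeStride2 (arr.drop start.toNat)).map (fun x => x + n)
  arr.take start.toNat ++ putStride2 (arr.drop start.toNat) vals

-- ===== PRECONDITION & SPEC =====
def Spec_solution (arr : List Int) (n : Int) (out : List Int) : Prop := out = solution_alt arr n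
instance (arr : List Int) (n : Int) (out : List Int) : Decidable (Spec_solution arr n out) := by unfold Spec_solution; infer_instance

-- ===== CLAIM (what is proved, stated in full; the proofs are below) =====
def Claim_equal_solution : Prop := ∀ (arr : List Int) (n : Int), Dom_solution arr n → Spec_solution arr n (solution arr n)

-- ===== LEMMAS AND PROOFS =====

-- alternating +n starting at the head: the common value both ports compute
def addEven (n : Int) : List Int → List Int
  | [] => []
  | [x] => [x + n]
  | x :: y :: xs => (x + n) :: y :: addEven n xs

theorem put_take (n : Int) (xs : List Int) :
    putStride2 xs ((takeStride2 xs).map (fun x => x + n)) = addEven n xs := by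
  induction xs using takeStride2.induct with
  | case1 => simp [putStride2, addEven]
  | case2 x => simp [takeStride2, putStride2, addEven]
  | case3 x y xs ih => simp [takeStride2, putStride2, addEven, ih]

theorem map_enum_even (n : Int) (xs : List Int) (k : Int) (hk : k % 2 = 0) :
    (PySem.List.enumerate xs k).map
      (fun ij => if PySem.Int.mod ij.1 2 == 0 then ij.2 + n else ij.2) = addEven n xs := by
  induction xs using takeStride2.induct generalizing k with
  | case1 => simp [PySem.List.enumerate, addEven]
  | case2 x =>
    have hx : PySem.Int.mod k 2 = 0 := by
      rw [PySem.Int.mod_eq_emod_of_pos (by omega)]; omega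
    rw [show PySem.List.enumerate [x] k = [(k, x)] from rfl]
    simp only [List.map_cons, List.map_nil, hx]
    simp [addEven]
  | case3 x y xs ih =>
    have hx : PySem.Int.mod k 2 = 0 := by
      rw [PySem.Int.mod_eq_emod_of_pos (by omega)]; omega
    have hy : PySem.Int.mod (k + 1) 2 = 1 := by
      rw [PySem.Int.mod_eq_emod_of_pos (by omega)]; omega
    rw [show PySem.List.enumerate (x :: y :: xs) k
        = (k, x) :: (k + 1, y) :: PySem.List.enumerate xs (k + 1 + 1) from rfl]
    simp only [List.map_cons, hx, hy]
    rw [ih (k + 1 + 1) (by omega)]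
    simp [addEven]

theorem map_enum_odd (n : Int) (xs : List Int) (k : Int) (hk : k % 2 = 1) :
    (PySem.List.enumerate xs k).map
      (fun ij => if PySem.Int.mod ij.1 2 != 0 then ij.2 + n else ij.2) = addEven n xs := by
  induction xs using takeStride2.induct generalizing k with
  | case1 => simp [PySem.List.enumerate, addEven]
  | case2 x =>
    have hx : PySem.Int.mod k 2 = 1 := by
      rw [PySem.Int.mod_eq_emod_of_pos (by omega)]; omega
    rw [show PySem.List.enumerate [x] k = [(k, x)] from rfl]
    simp only [List.map_cons, List.map_nil, hx]
    simp [addEven]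
  | case3 x y xs ih =>
    have hx : PySem.Int.mod k 2 = 1 := by
      rw [PySem.Int.mod_eq_emod_of_pos (by omega)]; omega
    have hy : PySem.Int.mod (k + 1) 2 = 0 := by
      rw [PySem.Int.mod_eq_emod_of_pos (by omega)]; omega
    rw [show PySem.List.enumerate (x :: y :: xs) k
        = (k, x) :: (k + 1, y) :: PySem.List.enumerate xs (k + 1 + 1) from rfl]
    simp only [List.map_cons, hx, hy]
    rw [ih (k + 1 + 1) (by omega)]
    simp [addEven]

-- ===== VERDICT (by name: the statement is the Claim_ definition above) =====
theorem solution_spec : Claim_equal_solution := by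
  intro arr n _
  unfold Spec_solution solution solution_alt
  have hlen : PySem.List.len arr = (arr.length : Int) := PySem.List.len_eq arr
  rcases Nat.even_or_odd arr.length with he | ho
  · -- even length: A takes its first branch; B has start = 1
    have hmod : arr.length % 2 = 0 := Nat.even_iff.mp he
    have hm : PySem.Int.mod (PySem.List.len arr) 2 = 0 := by
      rw [hlen, PySem.Int.mod_eq_emod_of_pos (by omega)]; omega
    rw [hm, if_pos (by decide)]
    simp only [PySem.List.foldl_append_singleton_eq_map, List.nil_append]
    cases arr with
    | nil => simp [PySem.List.enumerate, takeStride2, putStride2]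
    | cons a rest =>
      rw [show ((1 : Int) - 0).toNat = 1 by decide]
      simp only [List.take_succ_cons, List.take_zero, List.drop_succ_cons, List.drop_zero]
      rw [put_take]
      rw [show PySem.List.enumerate (a :: rest) 0
          = (0, a) :: PySem.List.enumerate rest 1 from rfl]
      simp only [List.map_cons]
      rw [map_enum_odd n rest 1 (by decide)]
      simp [PySem.Int.mod]
  · -- odd length: A takes its second branch; B has start = 0
    have hmod : arr.length % 2 = 1 := Nat.odd_iff.mp ho
    have hm : PySem.Int.mod (PySem.List.len arr) 2 = 1 := by
      rw [hlen, PySem.Int.mod_eq_emod_of_pos (by omega)]; omega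
    rw [hm, if_neg (by decide)]
    simp only [PySem.List.foldl_append_singleton_eq_map, List.nil_append]
    rw [show ((1 : Int) - 1).toNat = 0 by decide]
    simp only [List.take_zero, List.drop_zero, List.nil_append]
    rw [put_take]
    exact map_enum_even n arr 0 (by decide)
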